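-- pv_equiv track=rewrite | github.com/ElenaBadilloG/LyricSent.github.io | lyric_sentiment.py | clean_txt
-- ===== SOURCE A (Python) =====
-- import string
--
-- def clean_txt(txt, stopwords):
--     chars = [x for x in list(string.punctuation) + ['«', '»', '©','■', '€','°']]
--     txt = txt.replace('\n', ' ')
--     txt = txt.replace('Lyrics', ' ')
--     txt = txt.replace('  ', ' ')
--     txt = txt.strip('       ')
--     txt = txt.replace('Verse', ' ')
--     txt = txt.lower()
--     for char in chars:
--         if char in txt:
--             txt = txt.replace(char, '')
--     words = txt.split()
--     final_txt = ' '.join([w for w in words if w not in stopwords])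
--     return final_txt
-- ===== SOURCE B (Python) =====
-- import string
--
-- _BAD = set(string.punctuation) | set('\u00ab\u00bb\u00a9\u25a0\u20ac\u00b0')
--
-- def clean_txt(txt, stopwords):
--     # same ordered preprocessing A specifies
--     txt = (txt.replace('\n', ' ').replace('Lyrics', ' ').replace('  ', ' ')
--               .strip(' ').replace('Verse', ' ').lower())
--     stop = set(stopwords)
--     # one pass: build words char by char, dropping bad chars and stopwords on the fly
--     out = []
--     cur = []
--     for c in txt:
--         if c.isspace():
--             if cur:
--                 w = ''.join(cur)
--                 if w not in stop:
--                     out.append(w)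
--                 cur = []
--         elif c not in _BAD:
--             cur.append(c)
--     if cur:
--         w = ''.join(cur)
--         if w not in stop:
--             out.append(w)
--     return ' '.join(out)
-- ===== Notes on version B (the rewrite author's own statement) =====
-- stated objective: alternative
-- what changed: After A's ordered replace/strip/lower preprocessing, B replaces A's three staged passes (a loop of ~39 conditional whole-string .replace scans, then split(), then a stopword filter over the word list) by ONE character-level pass with an accumulator that simultaneously skips punctuation, splits words at whitespace and drops stopwords on the fly.
import Mathlib
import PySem

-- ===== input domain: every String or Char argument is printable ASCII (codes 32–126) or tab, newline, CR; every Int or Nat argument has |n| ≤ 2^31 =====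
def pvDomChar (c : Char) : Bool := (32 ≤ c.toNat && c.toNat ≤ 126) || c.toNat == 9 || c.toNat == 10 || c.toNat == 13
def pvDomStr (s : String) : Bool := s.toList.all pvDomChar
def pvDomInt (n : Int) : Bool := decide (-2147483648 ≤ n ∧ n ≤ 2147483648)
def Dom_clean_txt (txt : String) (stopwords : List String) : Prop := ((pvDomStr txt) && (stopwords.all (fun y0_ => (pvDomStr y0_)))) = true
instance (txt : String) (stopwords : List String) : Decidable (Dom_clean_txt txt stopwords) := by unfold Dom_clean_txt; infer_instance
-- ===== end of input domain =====

-- B keeps A's ordered replace/strip/lower preprocessing but then does ONE character-level pass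
-- (word accumulator) that skips punctuation, splits at whitespace and drops stopwords on the fly,
-- instead of A's three staged passes (~39 conditional .replace scans, split(), word filter)
-- (objective: alternative).

-- ===== PORT A =====
-- list(string.punctuation) + ['«','»','©','■','€','°'] (A rebuilds this list each call)
def pvCharsA : List Char :=
  "!\"#$%&'()*+,-./:;<=>?@[\\]^_`{|}~".toList ++ ['«', '»', '©', '■', '€', '°']

def clean_txt (txt : String) (stopwords : List String) : String :=
  let chars := pvCharsA
  let t1 := PySem.Str.replace txt "\n" " "
  let t2 := PySem.Str.replace t1 "Lyrics" " "
  let t3 := PySem.Str.replace t2 "  " " "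
  let t4 := PySem.Str.stripChars t3 "       "
  let t5 := PySem.Str.replace t4 "Verse" " "
  let t6 := PySem.Str.lower t5
  let t7 := chars.foldl
    (fun t c => if PySem.Str.isIn (String.singleton c) t
                then PySem.Str.replace t (String.singleton c) "" else t) t6
  let words := PySem.Str.split₀ t7
  PySem.Str.join " " (words.filter (fun w => !(stopwords.contains w)))

-- ===== PORT B =====
-- Source B's module constant _BAD = set(string.punctuation) | set('«»©■€°')
def pvBadB : PySem.Set Char :=
  PySem.Set.union (PySem.Set.ofList "!\"#$%&'()*+,-./:;<=>?@[\\]^_`{|}~".toList)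
                  (PySem.Set.ofList ['«', '»', '©', '■', '€', '°'])

-- Source B's for-loop over the characters: state (cur = current word, reversed; out = kept words,
-- reversed); 'if c.isspace(): close the word (keep it unless stopword); elif c not in _BAD: extend'
def pvAltLoop (stop : PySem.Set String) : List Char → List Char → List (List Char) → List (List Char)
  | [], cur, out =>
      if cur.isEmpty then out.reverse
      else if PySem.Set.contains stop (String.ofList cur.reverse) then out.reverse
      else (cur.reverse :: out).reverse
  | c :: rest, cur, out =>
      if PySem.Chars.isspace c then
        if cur.isEmpty then pvAltLoop stop rest [] out
        else if PySem.Set.contains stop (String.ofList cur.reverse) then pvAltLoop stop rest [] out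
        else pvAltLoop stop rest [] (cur.reverse :: out)
      else if PySem.Set.contains pvBadB c then pvAltLoop stop rest cur out
      else pvAltLoop stop rest (c :: cur) out

def clean_txt_alt (txt : String) (stopwords : List String) : String :=
  let t := PySem.Str.lower (PySem.Str.replace (PySem.Str.stripChars
             (PySem.Str.replace (PySem.Str.replace (PySem.Str.replace txt "\n" " ")
               "Lyrics" " ") "  " " ") " ") "Verse" " ")
  String.ofList (PySem.Chars.join [' '] (pvAltLoop (PySem.Set.ofList stopwords) t.toList [] []))

-- ===== PRECONDITION & SPEC =====
def Spec_clean_txt (txt : String) (stopwords : List String) (out : String) : Prop := out = clean_txt_alt txt stopwords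
instance (txt : String) (stopwords : List String) (out : String) : Decidable (Spec_clean_txt txt stopwords out) := by unfold Spec_clean_txt; infer_instance

-- ===== CLAIM (what is proved, stated in full; the proofs are below) =====
def Claim_equal_clean_txt : Prop := ∀ (txt : String) (stopwords : List String), Dom_clean_txt txt stopwords → Spec_clean_txt txt stopwords (clean_txt txt stopwords)

-- ===== LEMMAS AND PROOFS =====

-- deleting a single character by replace.go = filtering it out
theorem replace_go_single (c : Char) :
    ∀ (fuel : Nat) (l acc : List Char), l.length ≤ fuel →
      PySem.Chars.replace.go [c] [] fuel l acc = acc.reverse ++ l.filter (fun x => x != c) := by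
  intro fuel
  induction fuel with
  | zero =>
    intro l acc h
    cases l with
    | nil => simp [PySem.Chars.replace.go]
    | cons a t => simp at h
  | succ n ih =>
    intro l acc h
    cases l with
    | nil => simp [PySem.Chars.replace.go]
    | cons a t =>
      by_cases hc : a = c
      · subst hc
        have hp : List.isPrefixOf [a] (a :: t) = true := by
          simp [List.isPrefixOf]
        simp [PySem.Chars.replace.go, hp, ih t acc (Nat.le_of_succ_le_succ h)]
      · have hca : (c == a) = false := beq_eq_false_iff_ne.mpr (Ne.symm hc)
        have hp : List.isPrefixOf [c] (a :: t) = false := by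
          simp [List.isPrefixOf, hca]
        simp [PySem.Chars.replace.go, hp, ih t (a :: acc) (Nat.le_of_succ_le_succ h), hc]

theorem replace_single_eq_filter (l : List Char) (c : Char) :
    PySem.Chars.replace l [c] [] = l.filter (fun x => x != c) := by
  have := replace_go_single c l.length l [] le_rfl
  simpa [PySem.Chars.replace] using this

-- a character absent from the string: filtering it out is the identity
theorem filter_of_not_isIn (l : List Char) (c : Char)
    (h : PySem.Chars.isIn [c] l = false) : l.filter (fun x => x != c) = l := by
  have hc : c ∉ l := by
    intro hm
    obtain ⟨s, t, rfl⟩ := List.append_of_mem hm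
    rw [PySem.Chars.isIn_eq_false_iff] at h
    exact h ⟨s, t, by simp⟩
  refine List.filter_eq_self.mpr ?_
  intro x hx
  exact bne_iff_ne.mpr (fun e => hc (e ▸ hx))

-- A's replace loop over a character list, on strings: one filter pass over the code points
theorem strfold_toList (cs : List Char) (s : String) :
    (cs.foldl (fun t c => if PySem.Str.isIn (String.singleton c) t
                          then PySem.Str.replace t (String.singleton c) "" else t) s).toList
      = s.toList.filter (fun x => !(cs.contains x)) := by
  induction cs generalizing s with
  | nil => simp
  | cons d cs ih =>
    have hstep : (if PySem.Str.isIn (String.singleton d) s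
        then PySem.Str.replace s (String.singleton d) "" else s).toList
        = s.toList.filter (fun x => x != d) := by
      by_cases h : PySem.Str.isIn (String.singleton d) s = true
      · rw [if_pos h]
        simp [PySem.Str.toList_replace, replace_single_eq_filter]
      · have h'' : PySem.Str.isIn (String.singleton d) s = false := by simpa using h
        have h' : PySem.Chars.isIn [d] s.toList = false := by simpa using h''
        rw [if_neg h]
        exact (filter_of_not_isIn s.toList d h').symm
    rw [List.foldl_cons, ih, hstep, List.filter_filter]
    apply List.filter_congr
    intro x _
    cases hx : x == d
    · have hxd : ¬ x = d := by simpa using hx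
      simp [hx, bne, hxd]
    · have hxd : x = d := by simpa using hx
      simp [bne, hxd]

-- both space-strings strip exactly the space character
theorem stripChars_spaces (s : String) :
    PySem.Str.stripChars s "       " = PySem.Str.stripChars s " " := by
  rw [← String.toList_inj]
  simp only [PySem.Str.toList_stripChars]
  have h7 : "       ".toList = [' ',' ',' ',' ',' ',' ',' '] := by decide
  have h1 : " ".toList = [' '] := by decide
  simp [PySem.Chars.stripChars, h7, h1]

-- the bad set holds exactly the characters of A's list
theorem badB_eq_charsA (x : Char) :
    PySem.Set.contains pvBadB x = pvCharsA.contains x := by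
  rw [Bool.eq_iff_iff, List.contains_iff_mem]
  simp only [pvBadB, pvCharsA, PySem.Set.contains_iff, PySem.Set.mem_union, PySem.Set.mem_ofList,
        List.mem_append]

-- no bad character is whitespace
theorem bad_not_space (c : Char) (h : PySem.Set.contains pvBadB c = true) :
    PySem.Chars.isspace c = false := by
  rw [badB_eq_charsA, List.contains_iff_mem] at h
  have hall : pvCharsA.all (fun x => !PySem.Chars.isspace x) = true := by decide
  simpa using List.all_eq_true.mp hall c h

-- split₀.go accumulates: the acc is just prepended (reversed)
theorem split0_go_acc :
    ∀ (s cur : List Char) (acc : List (List Char)),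
      PySem.Chars.split₀.go s cur acc = acc.reverse ++ PySem.Chars.split₀.go s cur [] := by
  intro s
  induction s with
  | nil =>
    intro cur acc
    simp only [PySem.Chars.split₀.go]
    by_cases h : cur.isEmpty
    · rw [if_pos h, if_pos h]; simp
    · rw [if_neg h, if_neg h]; simp
  | cons c rest ih =>
    intro cur acc
    simp only [PySem.Chars.split₀.go]
    by_cases hsp : PySem.Chars.isspace c
    · rw [if_pos hsp, if_pos hsp]
      by_cases hcur : cur.isEmpty
      · rw [if_pos hcur, if_pos hcur]
        exact ih [] acc
      · rw [if_neg hcur, if_neg hcur]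
        rw [ih [] (cur.reverse :: acc), ih [] [cur.reverse]]
        simp
    · rw [if_neg hsp, if_neg hsp]
      exact ih (c :: cur) acc

-- B's single pass = (filter bad chars, then split₀.go, then filter stopwords)
theorem altLoop_eq (stop : PySem.Set String) :
    ∀ (s cur : List Char) (out : List (List Char)),
      pvAltLoop stop s cur out
        = out.reverse
          ++ (PySem.Chars.split₀.go (s.filter (fun c => !(PySem.Set.contains pvBadB c))) cur []).filter
              (fun w => !(PySem.Set.contains stop (String.ofList w))) := by
  intro s
  induction s with
  | nil =>
    intro cur out
    simp only [pvAltLoop, List.filter_nil, PySem.Chars.split₀.go]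
    by_cases hcur : cur.isEmpty
    · rw [if_pos hcur, if_pos hcur]; simp
    · rw [if_neg hcur, if_neg hcur]
      by_cases hst : String.ofList cur.reverse ∈ stop
      · rw [if_pos ((PySem.Set.contains_iff stop _).mpr hst)]
        simp [hst]
      · rw [if_neg (fun h => hst ((PySem.Set.contains_iff stop _).mp h))]
        simp [hst]
  | cons c rest ih =>
    intro cur out
    simp only [pvAltLoop]
    by_cases hsp : PySem.Chars.isspace c
    · have hbf : ¬ c ∈ pvBadB := by
        intro hm
        rw [bad_not_space c ((PySem.Set.contains_iff pvBadB c).mpr hm)] at hsp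
        simp at hsp
      rw [if_pos hsp, List.filter_cons_of_pos (by simp [hbf])]
      simp only [PySem.Chars.split₀.go]
      rw [if_pos hsp]
      by_cases hcur : cur.isEmpty
      · rw [if_pos hcur, if_pos hcur]
        exact ih [] out
      · rw [if_neg hcur, if_neg hcur, split0_go_acc _ [] [cur.reverse], List.reverse_singleton]
        by_cases hst : String.ofList cur.reverse ∈ stop
        · rw [if_pos ((PySem.Set.contains_iff stop _).mpr hst), ih [] out, List.filter_append,
              List.filter_cons_of_neg (by simp [hst]), List.filter_nil]
          simp
        · rw [if_neg (fun h => hst ((PySem.Set.contains_iff stop _).mp h)),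
              ih [] (cur.reverse :: out), List.filter_append,
              List.filter_cons_of_pos (by simp [hst]), List.filter_nil]
          simp
    · rw [if_neg hsp]
      by_cases hb : c ∈ pvBadB
      · rw [if_pos ((PySem.Set.contains_iff pvBadB c).mpr hb),
            List.filter_cons_of_neg (by simp [hb])]
        exact ih cur out
      · rw [if_neg (fun h => hb ((PySem.Set.contains_iff pvBadB c).mp h)),
            List.filter_cons_of_pos (by simp [hb])]
        simp only [PySem.Chars.split₀.go]
        rw [if_neg hsp]
        exact ih (c :: cur) out

-- ===== VERDICT (by name: the statement is the Claim_ definition above) =====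
set_option maxHeartbeats 1000000 in
theorem clean_txt_spec : Claim_equal_clean_txt := by
  unfold Claim_equal_clean_txt
  intro txt stopwords _
  simp only [Spec_clean_txt, clean_txt, clean_txt_alt]
  rw [stripChars_spaces, ← String.toList_inj]
  rw [PySem.Str.toList_join, String.toList_ofList]
  rw [altLoop_eq]
  have hgood : (fun c => !(PySem.Set.contains pvBadB c)) = (fun c => !(pvCharsA.contains c)) := by
    funext c; rw [badB_eq_charsA]
  rw [List.reverse_nil, List.nil_append, hgood, ← strfold_toList]
  have hsplit : PySem.Chars.split₀.go
      (pvCharsA.foldl (fun t c => if PySem.Str.isIn (String.singleton c) t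
        then PySem.Str.replace t (String.singleton c) "" else t)
        (PySem.Str.lower (PySem.Str.replace (PySem.Str.stripChars
          (PySem.Str.replace (PySem.Str.replace (PySem.Str.replace txt "\n" " ")
            "Lyrics" " ") "  " " ") " ") "Verse" " "))).toList [] []
      = (PySem.Str.split₀ (pvCharsA.foldl (fun t c => if PySem.Str.isIn (String.singleton c) t
        then PySem.Str.replace t (String.singleton c) "" else t)
        (PySem.Str.lower (PySem.Str.replace (PySem.Str.stripChars
          (PySem.Str.replace (PySem.Str.replace (PySem.Str.replace txt "\n" " ")
            "Lyrics" " ") "  " " ") " ") "Verse" " ")))).map String.toList := by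
    rw [PySem.Str.split₀_map_toList]; rfl
  rw [hsplit, List.filter_map]
  have hkeep : ((fun w => !(PySem.Set.contains (PySem.Set.ofList stopwords) (String.ofList w)))
      ∘ String.toList) = (fun w => !(stopwords.contains w)) := by
    funext w
    simp [Function.comp]
  rw [hkeep, String.toList_ofList]
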